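-- pv_equiv track=rewrite | github.com/MatiasGuanca/RepoPrueba | TP4EJ5-E1.py | filtrarPalabrasA
-- ===== SOURCE A (Python) =====
-- def filtrarPalabrasA(cadena,entero):
--     array=cadena.split(" ")
--     length=len(array)
--     for i in range(length):
--         if len(array[i])>=entero:
--             cadena=""
--             cadena=cadena+array[i]
--     return cadena
-- ===== SOURCE B (Python) =====
-- def filtrarPalabrasA(cadena, entero):
--     for palabra in reversed(cadena.split(" ")):
--         if len(palabra) >= entero:
--             return palabra
--     return cadena
-- ===== Notes on version B (the rewrite author's own statement) =====
-- stated objective: simpler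
-- what changed: Scans the split words from the end and returns the first qualifying word immediately, instead of a forward loop whose accumulator is overwritten by every later match; same fall-back to the original string.
import Mathlib
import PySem

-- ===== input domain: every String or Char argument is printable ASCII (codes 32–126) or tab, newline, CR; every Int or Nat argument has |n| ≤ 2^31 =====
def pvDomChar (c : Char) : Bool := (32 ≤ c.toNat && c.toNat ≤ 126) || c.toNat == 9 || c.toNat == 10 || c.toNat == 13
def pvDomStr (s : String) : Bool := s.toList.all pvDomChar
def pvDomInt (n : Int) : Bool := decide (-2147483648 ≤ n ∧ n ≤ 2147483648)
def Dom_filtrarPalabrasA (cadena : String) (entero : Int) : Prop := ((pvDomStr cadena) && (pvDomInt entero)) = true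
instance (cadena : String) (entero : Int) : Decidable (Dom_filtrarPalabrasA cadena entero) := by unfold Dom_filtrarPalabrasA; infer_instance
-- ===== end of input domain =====

-- B replaces A's forward loop (accumulator overwritten by every match) with a reverse
-- scan that returns the first qualifying word; same fall-back to the original string.

-- ===== PORT A =====
def filtrarPalabrasA (cadena : String) (entero : Int) : String :=
  let array := (PySem.Str.split? cadena " ").getD []
  let length := array.length
  (PySem.List.pyRange 0 length 1).foldl
    (fun cad i =>
      if entero ≤ (PySem.Str.len (PySem.List.pyGetD array i "") : Int) then
        "" ++ PySem.List.pyGetD array i ""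
      else cad)
    cadena

-- ===== PORT B =====
-- reverse scan with early return: first qualifying word from the end, else the original string
def pvFindRev (entero : Int) (fallback : String) : List String → String
  | [] => fallback
  | w :: ws => if entero ≤ (PySem.Str.len w : Int) then w else pvFindRev entero fallback ws

def filtrarPalabrasA_alt (cadena : String) (entero : Int) : String :=
  pvFindRev entero cadena ((PySem.Str.split? cadena " ").getD []).reverse

-- ===== PRECONDITION & SPEC =====
def Spec_filtrarPalabrasA (cadena : String) (entero : Int) (out : String) : Prop := out = filtrarPalabrasA_alt cadena entero
instance (cadena : String) (entero : Int) (out : String) : Decidable (Spec_filtrarPalabrasA cadena entero out) := by unfold Spec_filtrarPalabrasA; infer_instance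

-- ===== CLAIM (what is proved, stated in full; the proofs are below) =====
def Claim_equal_filtrarPalabrasA : Prop := ∀ (cadena : String) (entero : Int), Dom_filtrarPalabrasA cadena entero → Spec_filtrarPalabrasA cadena entero (filtrarPalabrasA cadena entero)

-- ===== LEMMAS AND PROOFS =====

-- last forward match (foldl) = first match in the reversed list
theorem foldl_lastMatch_eq_findRev (entero : Int) (c : String) (ws : List String) :
    ws.foldl (fun cad w => if entero ≤ (PySem.Str.len w : Int) then "" ++ w else cad) c
      = pvFindRev entero c ws.reverse := by
  induction ws using List.reverseRecOn with
  | nil => simp [pvFindRev]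
  | append_singleton ws w ih =>
      rw [List.foldl_append, List.reverse_append]
      simp only [List.foldl_cons, List.foldl_nil, List.reverse_cons, List.reverse_nil,
        List.nil_append, List.singleton_append, pvFindRev]
      split_ifs with h
      · simp
      · exact ih

-- ===== VERDICT (by name: the statement is the Claim_ definition above) =====
theorem filtrarPalabrasA_spec : Claim_equal_filtrarPalabrasA := by
  intro cadena entero _
  unfold Spec_filtrarPalabrasA filtrarPalabrasA filtrarPalabrasA_alt
  simp only
  have h := PySem.List.foldl_pyRange_pyGetD' ((PySem.Str.split? cadena " ").getD []) ""
    (fun cad w => if entero ≤ (PySem.Str.len w : Int) then "" ++ w else cad) cadena (a := 0) (by norm_num)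
  simp only [Int.toNat_zero, List.drop_zero] at h
  exact h.trans (foldl_lastMatch_eq_findRev entero cadena _)
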